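-- pv_equiv track=rewrite | github.com/ywcheong/solved-baekjoon | solve/1500+/1652.py | solve_garo
-- ===== SOURCE A (Python) =====
-- EMPTY = "."
--
-- def solve_garo(room):
--     size = len(room)
--     count = 0
--
--     for i in range(size):
--         space = 0
--         for j in range(size):
--             if room[i][j] == EMPTY:
--                 space += 1
--                 if space == 2:
--                     count += 1
--             else:
--                 space = 0
--
--     return count
-- ===== SOURCE B (Python) =====
-- EMPTY = "."
--
-- def solve_garo(room):
--     size = len(room)
--     return sum(
--         1
--         for row in room
--         for j in range(size - 1)
--         if row[j] == EMPTY and row[j + 1] == EMPTY and (j == 0 or row[j - 1] != EMPTY)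
--     )
-- ===== Notes on version B (the rewrite author's own statement) =====
-- stated objective: simpler
-- what changed: B replaces A's stateful per-cell run-length counter (space resets on walls, counts when it hits 2) by a single stateless comprehension that counts run starts: positions j with row[j]==row[j+1]=='.' and no '.' just before, summed over rows.
import Mathlib
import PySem

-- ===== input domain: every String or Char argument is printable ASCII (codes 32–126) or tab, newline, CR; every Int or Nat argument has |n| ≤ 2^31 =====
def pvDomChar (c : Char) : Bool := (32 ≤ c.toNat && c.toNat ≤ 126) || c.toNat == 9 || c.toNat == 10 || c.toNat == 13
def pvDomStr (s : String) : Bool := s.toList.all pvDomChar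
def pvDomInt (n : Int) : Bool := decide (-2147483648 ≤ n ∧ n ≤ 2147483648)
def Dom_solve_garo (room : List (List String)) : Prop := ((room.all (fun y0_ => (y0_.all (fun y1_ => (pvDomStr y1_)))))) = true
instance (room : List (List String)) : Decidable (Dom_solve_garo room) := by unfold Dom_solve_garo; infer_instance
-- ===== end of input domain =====

-- B counts each run's start (j with row[j]=row[j+1]='.' and no '.' just before j) in one
-- stateless comprehension instead of A's stateful run-length counter; same cost, plainer code.

-- ===== PORT A =====
def solve_garo (room : List (List String)) : Int :=
  let size : Int := PySem.List.len room
  (PySem.List.pyRange 0 size).foldl (fun count i =>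
    ((PySem.List.pyRange 0 size).foldl (fun (p : Int × Int) j =>
      if PySem.List.pyGetD (PySem.List.pyGetD room i []) j "" = "." then
        if p.2 + 1 = 2 then (p.1 + 1, p.2 + 1) else (p.1, p.2 + 1)
      else (p.1, 0)) (count, 0)).1) 0

-- ===== PORT B =====
def solve_garo_alt (room : List (List String)) : Int :=
  let size : Int := PySem.List.len room
  room.foldl (fun total row =>
    total + (PySem.List.pyRange 0 (size - 1)).foldl (fun c j =>
      if PySem.List.pyGetD row j "" = "." ∧ PySem.List.pyGetD row (j + 1) "" = "." ∧
         (j = 0 ∨ PySem.List.pyGetD row (j - 1) "" ≠ ".") then c + 1 else c) 0) 0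

-- ===== PRECONDITION & SPEC =====
-- Pre_ excludes exactly the inputs on which A raises IndexError: a row shorter than the grid
-- height (A indexes room[i][j] for all j < len(room)); B raises there too.
def Pre_solve_garo (room : List (List String)) : Prop :=
  ∀ row ∈ room, room.length ≤ row.length

instance (room : List (List String)) : Decidable (Pre_solve_garo room) := by
  unfold Pre_solve_garo; infer_instance

def pvWitness_solve_garo : List (List String) := [[".", "."], [".", "#"]]

def Spec_solve_garo (room : List (List String)) (out : Int) : Prop := out = solve_garo_alt room
instance (room : List (List String)) (out : Int) : Decidable (Spec_solve_garo room out) := by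
  unfold Spec_solve_garo; infer_instance

-- ===== CLAIM (what is proved, stated in full; the proofs are below) =====
def Claim_equal_solve_garo : Prop := ∀ (room : List (List String)),
  Dom_solve_garo room → Pre_solve_garo room → Spec_solve_garo room (solve_garo room)

-- ===== LEMMAS AND PROOFS =====

-- true iff the first cell of the list is the empty cell "."
def pvHeadDot : List String → Bool
  | [] => false
  | a :: _ => decide (a = ".")

-- structural form of A's per-row loop: s is the current run length ('space')
def pvA : Int → List String → Int
  | _, [] => 0
  | s, a :: t => if a = "." then (if s + 1 = 2 then 1 else 0) + pvA (s + 1) t else pvA 0 t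

-- structural form of B's per-row count: b says whether the previous cell was "."
def pvB : Bool → List String → Int
  | _, [] => 0
  | b, a :: t => (if a = "." ∧ pvHeadDot t = true ∧ b = false then 1 else 0) + pvB (decide (a = ".")) t

theorem pvGetD_take {l : List String} {n : Nat} {j : Int} (hj0 : 0 ≤ j) (hjn : j < (n : Int)) :
    PySem.List.pyGetD (l.take n) j "" = PySem.List.pyGetD l j "" := by
  lift j to ℕ using hj0
  have hk : j < n := by exact_mod_cast hjn
  simp [PySem.List.pyGetD_natCast, List.getD_eq_getElem?_getD, hk]

theorem pvGetD_cons {a : String} {t : List String} {j : Int} (hj : 0 ≤ j) :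
    PySem.List.pyGetD (a :: t) (j + 1) "" = PySem.List.pyGetD t j "" := by
  lift j to ℕ using hj
  have h : ((j : Int) + 1) = ((j + 1 : ℕ) : Int) := by push_cast; ring
  rw [h, PySem.List.pyGetD_natCast, PySem.List.pyGetD_natCast]
  rfl

theorem pvFoldl_shift (f : Int → Int → Int) (m c : Int) :
    (PySem.List.pyRange 1 (m + 1)).foldl f c =
    (PySem.List.pyRange 0 m).foldl (fun c j => f c (j + 1)) c := by
  rw [PySem.List.pyRange_one, PySem.List.pyRange_one]
  have hm : (m + 1 - 1).toNat = (m - 0).toNat := by omega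
  rw [hm, List.foldl_map, List.foldl_map]
  exact PySem.List.foldl_congr_mem _ _ _ _ (fun acc x _ => by
    rw [show (0:Int) + (x:Int) + 1 = 1 + x by ring])

theorem pvA_eq_foldl (l : List String) (c s : Int) :
    ((l.foldl (fun (p : Int × Int) a =>
      if a = "." then
        if p.2 + 1 = 2 then (p.1 + 1, p.2 + 1) else (p.1, p.2 + 1)
      else (p.1, 0)) (c, s)).1) = c + pvA s l := by
  induction l generalizing c s with
  | nil => simp [pvA]
  | cons a t ih =>
    simp only [List.foldl_cons, pvA]
    by_cases ha : a = "." <;> by_cases hs : s + 1 = 2 <;>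
      simp [ha, hs, ih] <;> omega

theorem pvA_pvB (l : List String) :
    (pvA 0 l = pvB false l) ∧
    (pvA 1 l = (if pvHeadDot l = true then 1 else 0) + pvB true l) ∧
    (∀ s : Int, 2 ≤ s → pvA s l = pvB true l) := by
  induction l with
  | nil => simp [pvA, pvB, pvHeadDot]
  | cons a t ih =>
    obtain ⟨ih0, ih1, ih2⟩ := ih
    have h2 : pvA 2 t = pvB true t := ih2 2 (by omega)
    by_cases ha : a = "."
    · refine ⟨?_, ?_, ?_⟩
      · simp [pvA, pvB, ha, ih1, pvHeadDot]
      · norm_num [pvA, pvB, ha, pvHeadDot, h2]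
      · intro s hs
        have hs2 : pvA (s + 1) t = pvB true t := ih2 (s + 1) (by omega)
        simp [pvA, pvB, ha, hs2, if_neg (by omega : ¬ s + 1 = 2), pvHeadDot]
    · exact ⟨by simp [pvA, pvB, ha, ih0],
        by simp [pvA, pvB, ha, ih0, pvHeadDot],
        fun s hs => by simp [pvA, pvB, ha, ih0]⟩

-- B's per-row fold, generalized over the "previous cell was a dot" flag b
theorem pvB_eq_fold (l : List String) (b : Bool) (c0 : Int) :
    (PySem.List.pyRange 0 ((l.length : Int) - 1)).foldl (fun c j =>
      if PySem.List.pyGetD l j "" = "." ∧ PySem.List.pyGetD l (j + 1) "" = "." ∧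
         ((j = 0 ∧ b = false) ∨ (1 ≤ j ∧ PySem.List.pyGetD l (j - 1) "" ≠ ".")) then c + 1 else c)
      c0 = c0 + pvB b l := by
  induction l generalizing b c0 with
  | nil => rw [PySem.List.pyRange_one_eq_nil (by simp)]; simp [pvB]
  | cons a t ih =>
    cases t with
    | nil => rw [PySem.List.pyRange_one_eq_nil (by simp)]; simp [pvB, pvHeadDot]
    | cons b' t' =>
      have hlen : ((a :: b' :: t').length : Int) - 1 = ((b' :: t').length : Int) := by
        simp
      rw [hlen, PySem.List.pyRange_one_cons (by simp [List.length_cons]), List.foldl_cons,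
        show ((b' :: t').length : Int) = (((b' :: t').length : Int) - 1) + 1 by ring,
        show (0:Int) + 1 = 1 by norm_num, pvFoldl_shift]
      rw [PySem.List.foldl_congr_mem _ _ (fun c j =>
        if PySem.List.pyGetD (b' :: t') j "" = "." ∧ PySem.List.pyGetD (b' :: t') (j + 1) "" = "." ∧
           ((j = 0 ∧ (decide (a = ".")) = false) ∨ (1 ≤ j ∧ PySem.List.pyGetD (b' :: t') (j - 1) "" ≠ ".")) then c + 1 else c) _
        ?_, ih]
      · -- initial step value and the pvB head term
        simp only [pvB, pvHeadDot]
        have h1 : PySem.List.pyGetD (a :: b' :: t') 1 "" = b' := by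
          simpa using pvGetD_cons (a := a) (t := b' :: t') (j := 0) le_rfl
        simp only [PySem.List.pyGetD_zero_cons, h1]
        by_cases ha : a = "." <;> by_cases hb' : b' = "." <;> by_cases hbf : b = false <;>
          simp [ha, hb', hbf] <;> omega
      · intro c j hj
        obtain ⟨hj0, hjlt⟩ := PySem.List.mem_pyRange_one.1 hj
        rw [pvGetD_cons hj0, show j + 1 + 1 = (j + 1) + 1 by ring, pvGetD_cons (by omega),
          show j + 1 - 1 = j by ring]
        by_cases hz : j = 0
        · subst hz
          simp [PySem.List.pyGetD_zero_cons, decide_eq_false_iff_not]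
        · have h4 : PySem.List.pyGetD (a :: b' :: t') j "" = PySem.List.pyGetD (b' :: t') (j - 1) "" := by
            have := pvGetD_cons (a := a) (t := b' :: t') (j := j - 1) (by omega)
            rwa [sub_add_cancel] at this
          have hA : ¬ (j + 1 = 0) := by omega
          have hB : (1:Int) ≤ j + 1 := by omega
          simp [hA, hB, hz, show (1:Int) ≤ j by omega, h4]

-- A's per-row loop on a row of length ≥ the grid height
theorem pvRowA (room : List (List String)) (row : List String)
    (hle : room.length ≤ row.length) (count : Int) :
    ((PySem.List.pyRange 0 (room.length : Int)).foldl (fun (p : Int × Int) j =>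
      if PySem.List.pyGetD row j "" = "." then
        if p.2 + 1 = 2 then (p.1 + 1, p.2 + 1) else (p.1, p.2 + 1)
      else (p.1, 0)) (count, 0)).1 = count + pvB false (row.take room.length) := by
  have h1 : (PySem.List.pyRange 0 (room.length : Int)).foldl (fun (p : Int × Int) j =>
      if PySem.List.pyGetD row j "" = "." then
        if p.2 + 1 = 2 then (p.1 + 1, p.2 + 1) else (p.1, p.2 + 1)
      else (p.1, 0)) (count, 0) =
      (PySem.List.pyRange 0 (room.length : Int)).foldl (fun (p : Int × Int) j =>
      if PySem.List.pyGetD (row.take room.length) j "" = "." then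
        if p.2 + 1 = 2 then (p.1 + 1, p.2 + 1) else (p.1, p.2 + 1)
      else (p.1, 0)) (count, 0) := by
    refine PySem.List.foldl_congr_mem _ _ _ _ (fun p j hj => ?_)
    obtain ⟨hj0, hjn⟩ := PySem.List.mem_pyRange_one.1 hj
    rw [pvGetD_take hj0 hjn]
  rw [h1, show ((room.length : Nat) : Int) = ((row.take room.length).length : Int) by
    simp [List.length_take, Nat.min_eq_left hle]]
  have h2 := congrArg Prod.fst (PySem.List.foldl_pyRange_zero_pyGetD' (row.take room.length) ""
    (fun (p : Int × Int) (a : String) =>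
      if a = "." then
        if p.2 + 1 = 2 then (p.1 + 1, p.2 + 1) else (p.1, p.2 + 1)
      else (p.1, 0)) (count, 0))
  refine Eq.trans h2 ?_
  rw [pvA_eq_foldl, (pvA_pvB _).1]

-- B's per-row sum term on a row of length ≥ the grid height
theorem pvRowB (room : List (List String)) (row : List String)
    (hle : room.length ≤ row.length) (total : Int) :
    total + (PySem.List.pyRange 0 ((room.length : Int) - 1)).foldl (fun c j =>
      if PySem.List.pyGetD row j "" = "." ∧ PySem.List.pyGetD row (j + 1) "" = "." ∧
         (j = 0 ∨ PySem.List.pyGetD row (j - 1) "" ≠ ".") then c + 1 else c) 0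
    = total + pvB false (row.take room.length) := by
  have hc : (PySem.List.pyRange 0 ((room.length : Int) - 1)).foldl (fun (c : Int) j =>
      if PySem.List.pyGetD row j "" = "." ∧ PySem.List.pyGetD row (j + 1) "" = "." ∧
         (j = 0 ∨ PySem.List.pyGetD row (j - 1) "" ≠ ".") then c + 1 else c) 0 =
      (PySem.List.pyRange 0 ((room.length : Int) - 1)).foldl (fun (c : Int) j =>
      if PySem.List.pyGetD (row.take room.length) j "" = "." ∧
         PySem.List.pyGetD (row.take room.length) (j + 1) "" = "." ∧
         ((j = 0 ∧ (false : Bool) = false) ∨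
          (1 ≤ j ∧ PySem.List.pyGetD (row.take room.length) (j - 1) "" ≠ ".")) then c + 1 else c) 0 := by
    refine PySem.List.foldl_congr_mem _ _ _ _ (fun c j hj => ?_)
    obtain ⟨hj0, hjlt⟩ := PySem.List.mem_pyRange_one.1 hj
    have e1 : PySem.List.pyGetD row j "" = PySem.List.pyGetD (row.take room.length) j "" :=
      (pvGetD_take hj0 (by omega)).symm
    have e2 : PySem.List.pyGetD row (j + 1) "" = PySem.List.pyGetD (row.take room.length) (j + 1) "" :=
      (pvGetD_take (by omega) (by omega)).symm
    by_cases hz : j = 0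
    · subst hz
      have e2' := e2; norm_num at e2'
      simp [e1, e2']
    · have e3 : PySem.List.pyGetD row (j - 1) "" = PySem.List.pyGetD (row.take room.length) (j - 1) "" :=
        (pvGetD_take (by omega) (by omega)).symm
      simp [e1, e2, e3, hz, show (1:Int) ≤ j by omega]
  rw [hc, show ((room.length : Nat) : Int) = ((row.take room.length).length : Int) by
    simp [List.length_take, Nat.min_eq_left hle], pvB_eq_fold]
  omega

-- ===== VERDICT (by name: the statement is the Claim_ definition above) =====
theorem solve_garo_spec : Claim_equal_solve_garo := by
  intro room _hdom hpre
  unfold Spec_solve_garo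
  simp only [solve_garo, solve_garo_alt, PySem.List.len_eq]
  refine Eq.trans (PySem.List.foldl_pyRange_zero_pyGetD' room []
    (fun (count : Int) (row : List String) =>
      ((PySem.List.pyRange 0 (room.length : Int)).foldl (fun (p : Int × Int) j =>
        if PySem.List.pyGetD row j "" = "." then
          if p.2 + 1 = 2 then (p.1 + 1, p.2 + 1) else (p.1, p.2 + 1)
        else (p.1, 0)) (count, 0)).1) 0) ?_
  rw [PySem.List.foldl_congr_mem room _
    (fun (count : Int) (row : List String) => count + pvB false (row.take room.length)) 0
    (fun count row hrow => pvRowA room row (hpre row hrow) count)]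
  rw [PySem.List.foldl_congr_mem room _
    (fun (total : Int) (row : List String) => total + pvB false (row.take room.length)) 0
    (fun total row hrow => pvRowB room row (hpre row hrow) total)]
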